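-- pv_equiv track=rewrite | github.com/Oxara/PtyhonTest | FRAMEWORK/FixCancellationTokenOnProject.py | UpdateUsingStatements
-- ===== SOURCE A (Python) =====
-- def UpdateUsingStatements(lines):
--     # Check if using System.Threading; exists
--     using_threading = False
--     for line in lines:
--         if line.strip() == 'using System.Threading;':
--             using_threading = True
--             break
--
--     # If using System.Threading; does not exist, add it after existing using statements
--     if not using_threading:
--         last_using_index = next((i for i, line in enumerate(lines[::-1]) if line.strip().startswith('using ')), len(lines))
--         last_using_index = len(lines) - last_using_index
--         lines.insert(last_using_index, 'using System.Threading;\n')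
--
--     return lines
-- ===== SOURCE B (Python) =====
-- def UpdateUsingStatements(lines):
--     # Single forward pass: note whether the threading using already exists and
--     # remember the index of the last 'using ' line; insert after it if missing.
--     found = False
--     last = -1
--     for i, line in enumerate(lines):
--         s = line.strip()
--         if s == 'using System.Threading;':
--             found = True
--         elif s.startswith('using '):
--             last = i
--     if not found:
--         lines.insert(last + 1, 'using System.Threading;\n')
--     return lines
-- ===== Notes on version B (the rewrite author's own statement) =====
-- stated objective: simpler
-- what changed: Replaced A's two scans (an existence scan plus a reversed enumerate/next scan with index arithmetic) by one forward pass tracking found and the last 'using ' index, inserting at last+1.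
import Mathlib
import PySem

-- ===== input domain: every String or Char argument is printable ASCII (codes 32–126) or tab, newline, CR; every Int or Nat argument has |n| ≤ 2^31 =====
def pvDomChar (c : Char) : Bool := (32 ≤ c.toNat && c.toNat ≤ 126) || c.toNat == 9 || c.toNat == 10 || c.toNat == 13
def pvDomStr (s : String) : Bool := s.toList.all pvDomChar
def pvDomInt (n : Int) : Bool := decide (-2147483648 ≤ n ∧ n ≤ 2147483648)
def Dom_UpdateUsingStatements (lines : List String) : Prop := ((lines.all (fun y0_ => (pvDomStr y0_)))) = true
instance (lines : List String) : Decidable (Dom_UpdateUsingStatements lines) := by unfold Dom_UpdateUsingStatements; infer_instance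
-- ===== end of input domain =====

-- B replaces A's existence scan + reversed-enumerate find by ONE forward pass (simpler); both Pythons
-- mutate `lines` in place via list.insert — the equivalence proved here is about the returned list.

-- line.strip() == 'using System.Threading;'
def pvIsThr (l : String) : Bool := PySem.Str.strip l == "using System.Threading;"
-- line.strip().startswith('using ')
def pvIsUsing (l : String) : Bool := PySem.Str.startswith (PySem.Str.strip l) "using "

-- ===== PORT A =====
-- the first 'for line in lines: … break' loop of A (existence check with break)
def pvAExists : List String → Bool
  | [] => false
  | l :: ls => if pvIsThr l then true else pvAExists ls

-- next((i for i, line in enumerate(rev) if line.strip().startswith('using ')), d)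
def pvANext (ps : List (Int × String)) (d : Int) : Int :=
  match ps with
  | [] => d
  | (i, l) :: rest => if pvIsUsing l then i else pvANext rest d

def UpdateUsingStatements (lines : List String) : List String :=
  let usingThreading := pvAExists lines
  if !usingThreading then
    -- lines[::-1] is the reverse (PySem.List.slice?_none_none_neg_one)
    let i := pvANext (PySem.List.enumerate lines.reverse 0) (lines.length : Int)
    let lastUsingIndex := (lines.length : Int) - i
    PySem.List.insert lines lastUsingIndex "using System.Threading;\n"
  else lines

-- ===== PORT B =====
def UpdateUsingStatements_alt (lines : List String) : List String :=
  let st := (PySem.List.enumerate lines 0).foldl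
    (fun (acc : Bool × Int) il =>
      if pvIsThr il.2 then (true, acc.2)
      else if pvIsUsing il.2 then (acc.1, il.1)
      else acc)
    (false, -1)
  if !st.1 then PySem.List.insert lines (st.2 + 1) "using System.Threading;\n"
  else lines

-- ===== PRECONDITION & SPEC =====
def Spec_UpdateUsingStatements (lines : List String) (out : List String) : Prop := out = UpdateUsingStatements_alt lines
instance (lines : List String) (out : List String) : Decidable (Spec_UpdateUsingStatements lines out) := by unfold Spec_UpdateUsingStatements; infer_instance

-- ===== CLAIM (what is proved, stated in full; the proofs are below) =====
def Claim_equal_UpdateUsingStatements : Prop := ∀ (lines : List String), Dom_UpdateUsingStatements lines → Spec_UpdateUsingStatements lines (UpdateUsingStatements lines)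

-- ===== LEMMAS AND PROOFS =====

-- index of the first 'using ' line, used to characterise both programs
def pvFirstU : List String → Option Nat
  | [] => none
  | l :: ls => if pvIsUsing l then some 0 else (pvFirstU ls).map (· + 1)

theorem pvFirstU_append_singleton (xs : List String) (y : String) :
    pvFirstU (xs ++ [y])
      = match pvFirstU xs with
        | some j => some j
        | none => if pvIsUsing y then some xs.length else none := by
  induction xs with
  | nil => by_cases h : pvIsUsing y <;> simp [pvFirstU, h]
  | cons x xs ih =>
    by_cases h : pvIsUsing x
    · simp [pvFirstU, h]
    · simp only [List.cons_append, pvFirstU, h, Bool.false_eq_true, if_false, ih]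
      cases hf : pvFirstU xs with
      | some j => simp
      | none => by_cases hy : pvIsUsing y <;> simp [hy]

theorem pvFirstU_lt (xs : List String) (j : Nat) (h : pvFirstU xs = some j) : j < xs.length := by
  induction xs generalizing j with
  | nil => simp [pvFirstU] at h
  | cons x xs ih =>
    by_cases hx : pvIsUsing x
    · simp only [pvFirstU, hx, if_true, Option.some.injEq] at h
      subst h; simp
    · simp only [pvFirstU, hx, Bool.false_eq_true, if_false, Option.map_eq_some_iff] at h
      obtain ⟨j', hj', rfl⟩ := h
      have := ih j' hj'
      simp; omega

theorem pvAExists_eq_any (ls : List String) : pvAExists ls = ls.any pvIsThr := by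
  induction ls with
  | nil => rfl
  | cons l ls ih => by_cases h : pvIsThr l <;> simp [pvAExists, h, ih]

theorem pvANext_eq (ls : List String) (d : Int) : ∀ s : Int,
    pvANext (PySem.List.enumerate ls s) d
      = match pvFirstU ls with
        | some j => s + (j : Int)
        | none => d := by
  induction ls with
  | nil => intro s; simp [PySem.List.enumerate_nil, pvANext, pvFirstU]
  | cons l ls ih =>
    intro s
    rw [PySem.List.enumerate_cons]
    by_cases h : pvIsUsing l
    · simp [pvANext, h, pvFirstU]
    · simp only [pvANext, h, Bool.false_eq_true, if_false, ih (s + 1), pvFirstU]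
      cases hf : pvFirstU ls with
      | some j => simp; ring
      | none => simp

theorem pvBfold_fst (ls : List String) : ∀ (s : Int) (b : Bool) (k : Int),
    ((PySem.List.enumerate ls s).foldl
      (fun (acc : Bool × Int) il =>
        if pvIsThr il.2 then (true, acc.2)
        else if pvIsUsing il.2 then (acc.1, il.1)
        else acc)
      (b, k)).1 = (b || ls.any pvIsThr) := by
  induction ls with
  | nil => intro s b k; simp [PySem.List.enumerate_nil]
  | cons l ls ih =>
    intro s b k
    rw [PySem.List.enumerate_cons]
    by_cases h : pvIsThr l
    · simp [h, List.foldl_cons, ih]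
    · by_cases h2 : pvIsUsing l <;> simp [h, h2, List.foldl_cons, ih]

theorem pvBfold_snd (ls : List String) (hnp : ls.all (fun l => !pvIsThr l)) :
    ∀ (s : Int) (b : Bool) (k : Int),
    ((PySem.List.enumerate ls s).foldl
      (fun (acc : Bool × Int) il =>
        if pvIsThr il.2 then (true, acc.2)
        else if pvIsUsing il.2 then (acc.1, il.1)
        else acc)
      (b, k)).2
      = match pvFirstU ls.reverse with
        | some j => s + ((ls.length : Int) - 1 - (j : Int))
        | none => k := by
  induction ls with
  | nil => intro s b k; simp [PySem.List.enumerate_nil, pvFirstU]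
  | cons l ls ih =>
    intro s b k
    simp only [List.all_cons, Bool.and_eq_true, Bool.not_eq_true'] at hnp
    obtain ⟨hl, hls⟩ := hnp
    rw [PySem.List.enumerate_cons]
    simp only [List.foldl_cons, hl, Bool.false_eq_true, if_false]
    have hrev : (l :: ls).reverse = ls.reverse ++ [l] := by simp
    rw [hrev, pvFirstU_append_singleton]
    by_cases h2 : pvIsUsing l
    · simp only [h2, if_true]
      rw [ih hls (s + 1) b s]
      cases hf : pvFirstU ls.reverse with
      | some j =>
        have hj : j < ls.length := by
          have := pvFirstU_lt _ _ hf; simpa using this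
        simp only [List.length_cons]
        push_cast
        ring
      | none =>
        simp only [List.length_reverse, List.length_cons]
        push_cast
        ring
    · simp only [h2, Bool.false_eq_true, if_false]
      rw [ih hls (s + 1) b k]
      cases hf : pvFirstU ls.reverse with
      | some j =>
        have hj : j < ls.length := by
          have := pvFirstU_lt _ _ hf; simpa using this
        simp only [List.length_cons]
        push_cast
        ring
      | none => simp

-- ===== VERDICT (by name: the statement is the Claim_ definition above) =====
theorem UpdateUsingStatements_spec : Claim_equal_UpdateUsingStatements := by
  intro lines _
  unfold Spec_UpdateUsingStatements UpdateUsingStatements UpdateUsingStatements_alt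
  rw [pvAExists_eq_any]
  by_cases hany : lines.any pvIsThr
  · simp [hany, pvBfold_fst]
  · have hall : lines.all (fun l => !pvIsThr l) := by
      simpa [List.all_eq_not_any_not] using hany
    simp only [hany, Bool.not_false, if_true, pvBfold_fst, Bool.false_or]
    rw [pvANext_eq, pvBfold_snd lines hall 0 false (-1)]
    cases hf : pvFirstU lines.reverse with
    | some j =>
      have hj : j < lines.length := by
        have := pvFirstU_lt _ _ hf; simpa using this
      have : (lines.length : Int) - (0 + (j : Int)) = 0 + ((lines.length : Int) - 1 - (j : Int)) + 1 := by omega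
      rw [this]
    | none =>
      norm_num
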